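-- pv_equiv track=rewrite | github.com/shkim9604/programmers_coding_test | level1/두 정수 사이의 합.py | solution
-- ===== SOURCE A (Python) =====
-- def solution(a, b):
--     big = 0
--     small = 0
--     sum = 0
--     if a > b:
--         big = a
--         small = b
--     else:
--         small = a
--         big = b
--     sum = sum + small
--     for i in range(big-small):
--         sum += small+1
--         small += 1
--     answer = sum
--     return answer
-- ===== SOURCE B (Python) =====
-- def solution(a, b):
--     return (a + b) * (abs(a - b) + 1) // 2
-- ===== Notes on version B (the rewrite author's own statement) =====
-- stated objective: faster
-- what changed: Replaces the element-by-element summation loop with the arithmetic-series closed form (a+b)*(|a-b|+1)//2.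
import Mathlib
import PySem

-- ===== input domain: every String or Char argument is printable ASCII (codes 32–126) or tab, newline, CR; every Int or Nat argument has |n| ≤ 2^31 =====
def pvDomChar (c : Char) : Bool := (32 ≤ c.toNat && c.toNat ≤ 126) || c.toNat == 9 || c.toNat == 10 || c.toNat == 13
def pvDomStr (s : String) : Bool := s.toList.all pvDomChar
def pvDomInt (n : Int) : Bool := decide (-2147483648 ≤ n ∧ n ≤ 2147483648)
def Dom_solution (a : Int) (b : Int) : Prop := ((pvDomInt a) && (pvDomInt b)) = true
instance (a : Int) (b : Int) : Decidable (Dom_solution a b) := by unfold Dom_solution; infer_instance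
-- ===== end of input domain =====

-- B replaces A's O(|a-b|) summation loop with the O(1) arithmetic-series closed form.

-- ===== PORT A =====
def solution (a : Int) (b : Int) : Int :=
  let (big, small) := if a > b then (a, b) else (b, a)
  let sum : Int := 0 + small
  let (sum, _small) :=
    (PySem.List.pyRange 0 (big - small) 1).foldl
      (fun (st : Int × Int) _i => (st.1 + (st.2 + 1), st.2 + 1)) (sum, small)
  sum

-- ===== PORT B =====
def solution_alt (a : Int) (b : Int) : Int :=
  PySem.Int.floordiv ((a + b) * ((a - b).natAbs + 1)) 2

-- ===== PRECONDITION & SPEC =====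
def Spec_solution (a : Int) (b : Int) (out : Int) : Prop := out = solution_alt a b
instance (a : Int) (b : Int) (out : Int) : Decidable (Spec_solution a b out) := by unfold Spec_solution; infer_instance

-- ===== CLAIM (what is proved, stated in full; the proofs are below) =====
def Claim_equal_solution : Prop := ∀ (a : Int) (b : Int), Dom_solution a b → Spec_solution a b (solution a b)

-- ===== LEMMAS AND PROOFS =====

-- A's loop, over any index list, doubled to avoid division: 2*result.
theorem pv_loop (l : List Int) (s sm : Int) :
    2 * (l.foldl (fun (st : Int × Int) _i => (st.1 + (st.2 + 1), st.2 + 1)) (s, sm)).1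
      = 2 * s + 2 * (l.length : Int) * sm + (l.length : Int) * ((l.length : Int) + 1) := by
  induction l generalizing s sm with
  | nil => simp
  | cons x t ih =>
    simp only [List.foldl_cons, List.length_cons]
    rw [ih]
    push_cast
    ring

theorem solution_spec : Claim_equal_solution := by
  intro a b _
  unfold Spec_solution solution solution_alt
  by_cases hab : a > b
  case neg =>
    have h : a ≤ b := by omega
    simp only [hab, if_false]
    have hl := pv_loop (PySem.List.pyRange 0 (b - a) 1) (0 + a) a
    rw [PySem.List.length_pyRange_one] at hl
    have hn : (((b - a - 0).toNat : Int)) = b - a := by omega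
    rw [hn] at hl
    have hlin : 2 * (0 + a) + 2 * (b - a) * a + (b - a) * ((b - a) + 1)
        = (a + b) * (b - a + 1) := by ring
    rw [hlin] at hl
    have hdvd : (2 : Int) ∣ (a + b) * (b - a + 1) := by
      rcases Int.even_or_odd a with ⟨k, hk⟩ | ⟨k, hk⟩ <;>
        rcases Int.even_or_odd b with ⟨m, hm⟩ | ⟨m, hm⟩ <;>
        [exact Dvd.dvd.mul_right ⟨k + m, by omega⟩ _;
         exact Dvd.dvd.mul_left ⟨m - k + 1, by omega⟩ _;
         exact Dvd.dvd.mul_left ⟨m - k, by omega⟩ _;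
         exact Dvd.dvd.mul_right ⟨k + m + 1, by omega⟩ _]
    obtain ⟨q, hq⟩ := hdvd
    have hna : ((a - b).natAbs : Int) = b - a := by omega
    rw [hna, hq, PySem.Int.floordiv_eq_ediv_of_pos (by omega),
        Int.mul_ediv_cancel_left _ (by omega)]
    rw [hq] at hl
    omega
  case pos =>
    have h : b < a := hab
    simp only [hab, if_true]
    have hl := pv_loop (PySem.List.pyRange 0 (a - b) 1) (0 + b) b
    rw [PySem.List.length_pyRange_one] at hl
    have hn : (((a - b - 0).toNat : Int)) = a - b := by omega
    rw [hn] at hl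
    have hlin : 2 * (0 + b) + 2 * (a - b) * b + (a - b) * ((a - b) + 1)
        = (a + b) * (a - b + 1) := by ring
    rw [hlin] at hl
    have hdvd : (2 : Int) ∣ (a + b) * (a - b + 1) := by
      rcases Int.even_or_odd a with ⟨k, hk⟩ | ⟨k, hk⟩ <;>
        rcases Int.even_or_odd b with ⟨m, hm⟩ | ⟨m, hm⟩ <;>
        [exact Dvd.dvd.mul_right ⟨k + m, by omega⟩ _;
         exact Dvd.dvd.mul_left ⟨k - m, by omega⟩ _;
         exact Dvd.dvd.mul_left ⟨k - m + 1, by omega⟩ _;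
         exact Dvd.dvd.mul_right ⟨k + m + 1, by omega⟩ _]
    obtain ⟨q, hq⟩ := hdvd
    have hna : ((a - b).natAbs : Int) = a - b := by omega
    rw [hna, hq, PySem.Int.floordiv_eq_ediv_of_pos (by omega),
        Int.mul_ediv_cancel_left _ (by omega)]
    rw [hq] at hl
    omega
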